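-- pv_equiv track=rewrite | github.com/SauravSinha76/scaler2 | class45/count_rectangle.py | solve
-- ===== SOURCE A (Python) =====
-- def solve(A,B):
--     n = len(A)
--     count = 0
--     for i in range(n):
--         for j in range(n):
--             if A[i] * A[j] < B:
--                 count += 1
--     return count
-- ===== SOURCE B (Python) =====
-- def _bisect_right(S, v):
--     lo = 0
--     hi = len(S)
--     while lo < hi:
--         mid = (lo + hi) // 2
--         if S[mid] <= v:
--             lo = mid + 1
--         else:
--             hi = mid
--     return lo
--
--
-- def solve(A, B):
--     S = sorted(A)
--     n = len(S)
--     total = 0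
--     for x in A:
--         if x > 0:
--             # x*y < B  <=>  y <= (B-1)//x
--             total += _bisect_right(S, (B - 1) // x)
--         elif x < 0:
--             # x*y < B  <=>  y > B/x  <=>  not (y <= B//x)
--             total += n - _bisect_right(S, B // x)
--         else:
--             total += n if B > 0 else 0
--     return total
-- ===== Notes on version B (the rewrite author's own statement) =====
-- stated objective: faster
-- what changed: Replaces the O(n^2) all-pairs double loop by sorting once and, for each element, counting partners with a hand-rolled binary search on a sign-dependent floor-division threshold.
import Mathlib
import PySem

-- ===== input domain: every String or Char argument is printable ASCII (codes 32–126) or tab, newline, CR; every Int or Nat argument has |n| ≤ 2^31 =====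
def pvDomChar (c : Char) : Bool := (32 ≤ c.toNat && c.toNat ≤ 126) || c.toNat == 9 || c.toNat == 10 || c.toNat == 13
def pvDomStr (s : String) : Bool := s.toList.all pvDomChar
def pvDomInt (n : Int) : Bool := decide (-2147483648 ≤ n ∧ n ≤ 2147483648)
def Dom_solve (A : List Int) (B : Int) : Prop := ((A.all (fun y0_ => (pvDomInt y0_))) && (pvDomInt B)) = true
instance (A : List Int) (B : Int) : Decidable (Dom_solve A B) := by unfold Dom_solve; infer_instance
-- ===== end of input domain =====

-- B replaces the all-pairs double loop by sorting once and, per element, a binary search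
-- on a sign-dependent floor-division threshold (objective: faster).

-- ===== PORT A =====
def solve (A : List Int) (B : Int) : Int :=
  let n : Int := A.length
  (PySem.List.pyRange 0 n 1).foldl (fun count i =>
    (PySem.List.pyRange 0 n 1).foldl (fun count j =>
      if PySem.List.pyGetD A i 0 * PySem.List.pyGetD A j 0 < B then count + 1 else count)
      count) 0

-- ===== PORT B =====
-- hand-written binary search from Source B (_bisect_right): 'while lo < hi' loop
def bsrAux (S : List Int) (v : Int) (lo hi : Nat) : Nat :=
  if _h : lo < hi then
    if PySem.List.pyGetD S (((lo + hi) / 2 : Nat) : Int) 0 ≤ v then bsrAux S v ((lo + hi) / 2 + 1) hi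
    else bsrAux S v lo ((lo + hi) / 2)
  else lo
termination_by hi - lo
decreasing_by all_goals omega

def solve_alt (A : List Int) (B : Int) : Int :=
  let S := PySem.List.sorted A (fun x => x) false
  let n : Int := S.length
  A.foldl (fun total x =>
    if 0 < x then total + (bsrAux S (PySem.Int.floordiv (B - 1) x) 0 S.length : Int)
    else if x < 0 then total + (n - (bsrAux S (PySem.Int.floordiv B x) 0 S.length : Int))
    else total + (if 0 < B then n else 0)) 0

-- ===== PRECONDITION & SPEC =====
def Spec_solve (A : List Int) (B : Int) (out : Int) : Prop := out = solve_alt A B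
instance (A : List Int) (B : Int) (out : Int) : Decidable (Spec_solve A B out) := by unfold Spec_solve; infer_instance

-- ===== CLAIM (what is proved, stated in full; the proofs are below) =====
def Claim_equal_solve : Prop := ∀ (A : List Int) (B : Int), Dom_solve A B → Spec_solve A B (solve A B)

-- ===== LEMMAS AND PROOFS =====

-- If all positions below lo satisfy p and all positions from lo on refute p, countP p = lo.
theorem countP_eq_of_split (p : Int → Bool) (S : List Int) (lo : Nat) (hlo : lo ≤ S.length)
    (h1 : ∀ i (h : i < S.length), i < lo → p S[i])
    (h2 : ∀ i (h : i < S.length), lo ≤ i → ¬ p S[i]) :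
    S.countP p = lo := by
  have hsplit : S = S.take lo ++ S.drop lo := (List.take_append_drop lo S).symm
  rw [hsplit, List.countP_append]
  have ht : (S.take lo).countP p = lo := by
    have hall : ∀ x ∈ S.take lo, p x := by
      intro x hx
      obtain ⟨i, hi, hget⟩ := List.mem_iff_getElem.mp hx
      have hi2 := hi
      simp only [List.length_take] at hi2
      have hi' : i < S.length := by omega
      have hx' : x = S[i] := by rw [← hget]; exact List.getElem_take
      rw [hx']
      exact h1 i hi' (by omega)
    rw [List.countP_eq_length.mpr hall, List.length_take]
    omega
  have hd : (S.drop lo).countP p = 0 := by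
    rw [List.countP_eq_zero]
    intro x hx
    obtain ⟨i, hi, hget⟩ := List.mem_iff_getElem.mp hx
    have hi2 := hi
    simp only [List.length_drop] at hi2
    have hi' : lo + i < S.length := by omega
    have hx' : x = S[lo + i] := by rw [← hget]; exact List.getElem_drop
    rw [hx']
    exact h2 (lo + i) hi' (by omega)
  omega

-- The binary search returns countP (· ≤ v) on a sorted list.
theorem bsrAux_eq_countP (S : List Int) (v : Int)
    (hs : List.Pairwise (fun a b => a ≤ b) S) :
    ∀ lo hi, lo ≤ hi → hi ≤ S.length →
    (∀ i (h : i < S.length), i < lo → S[i] ≤ v) →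
    (∀ i (h : i < S.length), hi ≤ i → v < S[i]) →
    bsrAux S v lo hi = S.countP (fun y => decide (y ≤ v)) := by
  intro lo hi
  induction' hn : hi - lo using Nat.strong_induction_on with d ih generalizing lo hi
  intro hle hhi h1 h2
  rw [bsrAux]
  split_ifs with hlt hv
  · -- S[mid] ≤ v : move lo up
    have hmlen : (lo + hi) / 2 < S.length := by omega
    simp only [PySem.List.pyGetD_natCast, List.getD_eq_getElem?_getD,
      List.getElem?_eq_getElem hmlen, Option.getD_some] at hv
    have hmono := List.pairwise_iff_getElem.mp hs
    exact ih (hi - ((lo + hi) / 2 + 1)) (by omega) ((lo + hi) / 2 + 1) hi (by omega) (by omega) hhi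
      (fun i h hi' => by
        rcases Nat.lt_or_ge i ((lo + hi) / 2) with hc | hc
        · exact le_trans (hmono i ((lo + hi) / 2) h hmlen hc) hv
        · have : i = (lo + hi) / 2 := by omega
          subst this; exact hv)
      h2
  · -- v < S[mid] : move hi down
    have hmlen : (lo + hi) / 2 < S.length := by omega
    simp only [PySem.List.pyGetD_natCast, List.getD_eq_getElem?_getD,
      List.getElem?_eq_getElem hmlen, Option.getD_some] at hv
    rw [not_le] at hv
    have hmono := List.pairwise_iff_getElem.mp hs
    exact ih ((lo + hi) / 2 - lo) (by omega) lo ((lo + hi) / 2) (by omega) (by omega) (by omega) h1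
      (fun i h hi' => by
        rcases Nat.lt_or_ge ((lo + hi) / 2) i with hc | hc
        · exact lt_of_lt_of_le hv (hmono ((lo + hi) / 2) i hmlen h hc)
        · have : i = (lo + hi) / 2 := by omega
          subst this; exact hv)
  · have hlohi : lo = hi := by omega
    subst hlohi
    exact (countP_eq_of_split _ S lo hhi
      (fun i h hi' => by simpa using h1 i h hi')
      (fun i h hi' => by simpa using not_le.mpr (h2 i h hi'))).symm

-- Per-element count: each branch of B equals countP (fun y => x*y < B) over A.
theorem branch_eq_countP (A : List Int) (B x : Int) :
    (if 0 < x then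
      ((bsrAux (PySem.List.sorted A (fun x => x) false) (PySem.Int.floordiv (B - 1) x) 0
        (PySem.List.sorted A (fun x => x) false).length : Nat) : Int)
    else if x < 0 then
      (((PySem.List.sorted A (fun x => x) false).length : Int) -
        (bsrAux (PySem.List.sorted A (fun x => x) false) (PySem.Int.floordiv B x) 0
          (PySem.List.sorted A (fun x => x) false).length : Nat))
    else (if 0 < B then ((PySem.List.sorted A (fun x => x) false).length : Int) else 0))
    = (A.countP (fun y => decide (x * y < B)) : Int) := by
  set S := PySem.List.sorted A (fun x => x) false with hS
  have hperm : S.Perm A := PySem.List.sorted_perm A (fun x => x) false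
  have hs : List.Pairwise (fun a b : Int => a ≤ b) S := PySem.List.sorted_pairwise A (fun x => x)
  have hlen : S.length = A.length := hperm.length_eq
  split_ifs with hx hneg hB
  · -- 0 < x : y ≤ (B-1)//x ↔ x*y < B
    rw [bsrAux_eq_countP S _ hs 0 S.length (by omega) le_rfl (by omega) (by omega)]
    rw [hperm.countP_eq]
    congr 1
    apply List.countP_congr
    intro y _
    have hiff := PySem.Int.le_floordiv_iff_mul_le (a := B - 1) (b := x) (q := y) hx
    simp only [decide_eq_true_eq]
    constructor
    · intro h; have := hiff.mp h; nlinarith [mul_comm x y]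
    · intro h; apply hiff.mpr; nlinarith [mul_comm x y]
  · -- x < 0 : x*y < B ↔ ¬ (y ≤ B//x)
    rw [bsrAux_eq_countP S _ hs 0 S.length (by omega) le_rfl (by omega) (by omega)]
    have hflip : ∀ y : Int, (y ≤ PySem.Int.floordiv B x) ↔ ¬ (x * y < B) := by
      intro y
      rw [← PySem.Int.floordiv_neg_neg B x,
          PySem.Int.le_floordiv_iff_mul_le (a := -B) (b := -x) (q := y) (by omega)]
      constructor
      · intro h; nlinarith [mul_comm x y]
      · intro h; nlinarith [mul_comm x y]
    have hcomp := List.length_eq_countP_add_countP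
      (fun y => decide (y ≤ PySem.Int.floordiv B x)) (l := S)
    have hsub : S.countP (fun a => decide ¬(decide (a ≤ PySem.Int.floordiv B x) = true))
        = A.countP (fun y => decide (x * y < B)) := by
      rw [← hperm.countP_eq]
      apply List.countP_congr
      intro y _
      simp only [decide_eq_true_eq]
      constructor
      · intro h; by_contra hc; exact h ((hflip y).mpr hc)
      · intro h hc; exact ((hflip y).mp hc) h
    rw [← hsub, hlen] at *
    omega
  · -- x = 0, 0 < B : every y counts
    have hx0 : x = 0 := by omega
    subst hx0
    have : A.countP (fun y => decide ((0:Int) * y < B)) = A.length := by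
      apply List.countP_eq_length.mpr
      intro y _; simpa using hB
    rw [this, hlen]
  · -- x = 0, B ≤ 0 : no y counts
    have hx0 : x = 0 := by omega
    subst hx0
    have : A.countP (fun y => decide ((0:Int) * y < B)) = 0 := by
      rw [List.countP_eq_zero]
      intro y _; simpa using le_of_not_gt hB
    rw [this]; rfl

-- A as a fold of per-element counts.
theorem solve_eq_fold (A : List Int) (B : Int) :
    solve A B = A.foldl (fun c x => c + (A.countP (fun y => decide (x * y < B)) : Int)) 0 := by
  unfold solve
  rw [show ((A.length : Int)) = PySem.List.len A from rfl]
  rw [PySem.List.foldl_pyRange_zero_pyGetD A 0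
    (fun count x => (PySem.List.pyRange 0 (PySem.List.len A)).foldl (fun count j =>
      if x * PySem.List.pyGetD A j 0 < B then count + 1 else count) count) 0]
  apply PySem.List.foldl_congr_mem
  intro c x _
  rw [PySem.List.foldl_pyRange_zero_pyGetD A 0
    (fun count y => if x * y < B then count + 1 else count) c]
  simpa using PySem.List.foldl_count_if (fun y => decide (x * y < B)) A c

-- ===== VERDICT (by name: the statement is the Claim_ definition above) =====
theorem solve_spec : Claim_equal_solve := by
  intro A B _
  unfold Spec_solve
  rw [solve_eq_fold]
  unfold solve_alt
  simp only []
  apply (PySem.List.foldl_congr_mem A _ _ 0 ?_).symm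
  intro acc x _
  have h := branch_eq_countP A B x
  split_ifs at h ⊢ <;> rw [h]
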